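-- pv_equiv track=rewrite | github.com/abumonk/sandbox | .agent/adventures/ADV-007/_build_report.py | group_order
-- ===== SOURCE A (Python) =====
-- def group_order(groups: set[str]) -> list[str]:
--     preferred = [
--         "root", "manifest", "designs", "plans", "schemas", "roles",
--         "research", "tests", "tasks", "reviews",
--     ]
--     known = [g for g in preferred if g in groups]
--     extras = sorted(g for g in groups if g not in preferred)
--     return known + extras
-- ===== SOURCE B (Python) =====
-- def group_order(groups: set[str]) -> list[str]:
--     preferred = [
--         "root", "manifest", "designs", "plans", "schemas", "roles",
--         "research", "tests", "tasks", "reviews",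
--     ]
--     rank = {name: i for i, name in enumerate(preferred)}
--     return sorted(groups, key=lambda g: (rank.get(g, len(preferred)), g))
-- ===== Notes on version B (the rewrite author's own statement) =====
-- stated objective: idiomatic
-- what changed: Replaces A's partition into a preferred-filter pass plus a separately sorted extras list (then concatenation) by one keyed sort of the whole set, using a rank dict built once so preferred names order by their fixed index and all others follow alphabetically.
import Mathlib
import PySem

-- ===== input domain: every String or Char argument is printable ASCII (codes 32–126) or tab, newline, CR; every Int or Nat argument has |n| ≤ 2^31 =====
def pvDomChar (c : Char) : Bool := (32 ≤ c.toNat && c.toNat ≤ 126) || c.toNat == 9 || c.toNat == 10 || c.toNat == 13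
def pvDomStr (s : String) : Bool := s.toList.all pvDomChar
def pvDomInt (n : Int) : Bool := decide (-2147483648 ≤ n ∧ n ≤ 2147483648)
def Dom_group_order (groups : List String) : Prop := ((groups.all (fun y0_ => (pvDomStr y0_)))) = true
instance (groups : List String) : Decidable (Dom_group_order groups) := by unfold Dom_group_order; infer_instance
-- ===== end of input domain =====

-- B replaces A's preferred-filter + separately-sorted-extras + concatenation by a single
-- keyed sort over a rank dict built once (idiomatic; same asymptotic cost).

-- the fixed preference list, shared verbatim by both Pythons
def pvPreferred : List String :=
  ["root", "manifest", "designs", "plans", "schemas", "roles",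
   "research", "tests", "tasks", "reviews"]

-- ===== PORT A =====
def group_order (groups : List String) : List String :=
  let preferred := pvPreferred
  let known := preferred.filter (fun g => groups.contains g)
  let extras := PySem.List.sorted (groups.filter (fun g => !(preferred.contains g))) (fun g => g)
  known ++ extras

-- ===== PORT B =====
-- rank = {name: i for i, name in enumerate(preferred)}
def pvRank : PySem.Dict String Int :=
  (PySem.List.enumerate pvPreferred).foldl (fun d p => PySem.Dict.insert d p.2 p.1) PySem.Dict.empty

-- key=lambda g: (rank.get(g, len(preferred)), g) — the first tuple component
def pvKeyB (g : String) : Int := PySem.Dict.getD pvRank g (Int.ofNat pvPreferred.length)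

def group_order_alt (groups : List String) : List String :=
  PySem.List.sorted2 groups pvKeyB (fun g => g)

-- ===== PRECONDITION & SPEC =====
-- Python's parameter is a set[str]; under the List encoding Pre_ states exactly that the
-- list holds distinct elements (it excludes no actual set input).
def Pre_group_order (groups : List String) : Prop := groups.Nodup
instance (groups : List String) : Decidable (Pre_group_order groups) := by unfold Pre_group_order; infer_instance
def pvWitness_group_order : List String := ["tests", "zzz", "root"]

def Spec_group_order (groups : List String) (out : List String) : Prop := out = group_order_alt groups
instance (groups : List String) (out : List String) : Decidable (Spec_group_order groups out) := by unfold Spec_group_order; infer_instance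

-- ===== CLAIM (what is proved, stated in full; the proofs are below) =====
def Claim_equal_group_order : Prop := ∀ (groups : List String), Dom_group_order groups → Pre_group_order groups → Spec_group_order groups (group_order groups)

-- ===== LEMMAS AND PROOFS =====

-- B's full sort key, as a lexicographic pair
def pvKeyL (g : String) : Int ×ₗ String := toLex (pvKeyB g, g)

-- sorted2's hand-rolled tuple comparison is the lexicographic order on (pvKeyB g, g)
theorem alt_eq_sorted_keyL (groups : List String) :
    group_order_alt groups = PySem.List.sorted groups pvKeyL := by
  have hfun : (fun a b => decide (pvKeyB a < pvKeyB b) || (!decide (pvKeyB b < pvKeyB a) && decide (a < b)))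
      = (fun a b => decide (pvKeyL a < pvKeyL b)) := by
    funext a b
    rcases lt_trichotomy (pvKeyB a) (pvKeyB b) with h | h | h
    · simp [pvKeyL, Prod.Lex.lt_iff, h, not_lt_of_gt h]
    · simp [pvKeyL, Prod.Lex.lt_iff, h]
    · simp [pvKeyL, Prod.Lex.lt_iff, h, not_lt_of_gt h, ne_of_gt h]
  show PySem.List.sorted2 groups pvKeyB (fun g => g) = _
  rw [PySem.List.sorted_eq_foldl_insertBy]
  simp only [PySem.List.sorted2, Bool.false_eq_true, ite_false]
  rw [hfun]

theorem keyB_lt_of_mem (g : String) (h : g ∈ pvPreferred) : pvKeyB g < 10 := by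
  simp only [pvPreferred] at h
  fin_cases h <;> decide

theorem keyB_of_not_mem (g : String) (h : g ∉ pvPreferred) : pvKeyB g = 10 := by
  simp only [pvPreferred, List.mem_cons, List.not_mem_nil, or_false, not_or] at h
  obtain ⟨h0, h1, h2, h3, h4, h5, h6, h7, h8, h9⟩ := h
  have e0 : ("root" == g) = false := beq_eq_false_iff_ne.mpr (Ne.symm h0)
  have e1 : ("manifest" == g) = false := beq_eq_false_iff_ne.mpr (Ne.symm h1)
  have e2 : ("designs" == g) = false := beq_eq_false_iff_ne.mpr (Ne.symm h2)
  have e3 : ("plans" == g) = false := beq_eq_false_iff_ne.mpr (Ne.symm h3)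
  have e4 : ("schemas" == g) = false := beq_eq_false_iff_ne.mpr (Ne.symm h4)
  have e5 : ("roles" == g) = false := beq_eq_false_iff_ne.mpr (Ne.symm h5)
  have e6 : ("research" == g) = false := beq_eq_false_iff_ne.mpr (Ne.symm h6)
  have e7 : ("tests" == g) = false := beq_eq_false_iff_ne.mpr (Ne.symm h7)
  have e8 : ("tasks" == g) = false := beq_eq_false_iff_ne.mpr (Ne.symm h8)
  have e9 : ("reviews" == g) = false := beq_eq_false_iff_ne.mpr (Ne.symm h9)
  simp [pvKeyB, pvRank, pvPreferred, PySem.Dict.getD, PySem.Dict.get?, List.find?,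
    PySem.Dict.insert, PySem.Dict.empty, PySem.List.enumerate,
    e0, e1, e2, e3, e4, e5, e6, e7, e8, e9]

theorem preferred_pairwise : pvPreferred.Pairwise (fun a b => pvKeyB a < pvKeyB b) := by decide

theorem group_order_eq_sorted (groups : List String) (hnd : groups.Nodup) :
    PySem.List.sorted groups pvKeyL = group_order groups := by
  apply PySem.List.sorted_eq_of_perm_of_pairwise_lt
  · -- permutation
    show (pvPreferred.filter (fun g => groups.contains g) ++ _).Perm groups
    have h1 : (pvPreferred.filter (fun g => groups.contains g)).Perm
        (groups.filter (fun g => pvPreferred.contains g)) := by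
      rw [List.perm_ext_iff_of_nodup
        ((by decide : pvPreferred.Nodup).filter _) (hnd.filter _)]
      intro a
      simp [List.mem_filter, and_comm]
    have h2 : (PySem.List.sorted (groups.filter (fun g => !(pvPreferred.contains g))) (fun g => g)).Perm
        (groups.filter (fun g => !(pvPreferred.contains g))) := PySem.List.sorted_perm _ _ _
    exact ((h1.append h2).trans (List.filter_append_perm _ groups))
  · -- strictly increasing under pvKeyL
    show List.Pairwise _ (pvPreferred.filter (fun g => groups.contains g) ++ _)
    rw [List.pairwise_append]
    refine ⟨?_, ?_, ?_⟩
    · exact (preferred_pairwise.filter _).imp (fun h => Prod.Lex.lt_iff.mpr (Or.inl h))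
    · have hndE : (PySem.List.sorted (groups.filter (fun g => !(pvPreferred.contains g))) (fun g => g)).Nodup :=
        (PySem.List.sorted_perm _ _ _).nodup_iff.mpr (hnd.filter _)
      have hle := PySem.List.sorted_pairwise (groups.filter (fun g => !(pvPreferred.contains g))) (fun g => g)
      have h10 : ∀ x ∈ PySem.List.sorted (groups.filter (fun g => !(pvPreferred.contains g))) (fun g => g),
          pvKeyB x = 10 := fun x hx =>
        keyB_of_not_mem x
          (by simpa using (List.mem_filter.mp ((PySem.List.sorted_perm _ _ _).mem_iff.mp hx)).2)
      refine (hle.and hndE).imp_of_mem ?_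
      intro a b ha hb hab
      exact Prod.Lex.lt_iff.mpr (Or.inr ⟨by simp [pvKeyL, h10 a ha, h10 b hb], lt_of_le_of_ne hab.1 hab.2⟩)
    · intro a ha b hb
      have hka : pvKeyB a < 10 := keyB_lt_of_mem a (List.mem_of_mem_filter ha)
      have hkb : pvKeyB b = 10 := by
        have hbm := (PySem.List.sorted_perm _ _ _).mem_iff.mp hb
        have := (List.mem_filter.mp hbm).2
        exact keyB_of_not_mem b (by simpa using this)
      exact Prod.Lex.lt_iff.mpr (Or.inl (by simp only [pvKeyL, ofLex_toLex]; omega))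

-- ===== VERDICT (by name: the statement is the Claim_ definition above) =====
theorem group_order_spec : Claim_equal_group_order := by
  intro groups _ hpre
  show group_order groups = group_order_alt groups
  rw [alt_eq_sorted_keyL, group_order_eq_sorted groups hpre]
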